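-- pv_equiv track=rewrite | github.com/paramzzz/CSA0605-DAA | Prg 24( Remove 1st occurrence of char).py | solve
-- ===== SOURCE A (Python) =====
-- def solve(s: str) -> str:
--     letters = set('abcdefghijklmnopqrstuvwxyz')
--     result = s
--
--     prev_result = ""
--
--
--     while result:
--
--         to_remove = set()
--         for letter in letters:
--             if letter in result:
--                 to_remove.add(letter)
--         prev_result = result
--
--         for char in to_remove:
--             result = result.replace(char, '', 1)
--
--     return prev_result
-- ===== SOURCE B (Python) =====
-- def solve(s: str) -> str:
--     # One counting pass instead of A's repeated peel-one-occurrence rounds: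
--     # the survivors of A's last round are exactly the maximum-frequency
--     # characters, each kept once, ordered by last occurrence in s.
--     if not s:
--         return ""
--     m = 0
--     for c in set(s):
--         k = s.count(c)
--         if k > m:
--             m = k
--     out = []
--     seen = set()
--     for c in reversed(s):
--         if c not in seen:
--             seen.add(c)
--             if s.count(c) == m:
--                 out.append(c)
--     out.reverse()
--     return ''.join(out)
-- ===== Notes on version B (the rewrite author's own statement) =====
-- stated objective: faster
-- what changed: A repeatedly removes one occurrence of every letter still present until the string empties and returns the last nonempty state; B computes the same result in closed form with one counting pass: the maximum-frequency characters, once each, in order of last occurrence.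
import Mathlib
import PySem

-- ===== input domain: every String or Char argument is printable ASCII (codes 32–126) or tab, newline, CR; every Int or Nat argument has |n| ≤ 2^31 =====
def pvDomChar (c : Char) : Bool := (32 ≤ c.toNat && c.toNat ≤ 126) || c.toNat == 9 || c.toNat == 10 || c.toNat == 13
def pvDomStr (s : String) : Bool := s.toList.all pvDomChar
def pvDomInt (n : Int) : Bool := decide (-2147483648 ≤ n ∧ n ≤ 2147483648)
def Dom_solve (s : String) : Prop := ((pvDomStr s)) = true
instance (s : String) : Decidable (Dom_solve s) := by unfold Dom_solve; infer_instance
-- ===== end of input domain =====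

-- B replaces A's repeated remove-one-occurrence-of-each-letter rounds by a single
-- counting pass (maximum-frequency characters, once each, in last-occurrence order);
-- equality of return values is proved on Pre_solve (all-lowercase strings) — on any
-- other nonempty input A's while loop never terminates.

-- ===== PORT A =====
def pvAlpha : List Char := "abcdefghijklmnopqrstuvwxyz".toList

-- One pass of the while-loop body: build to_remove, then remove one occurrence of
-- each of its characters.  Both Python iterations are over sets, whose (hash) order
-- does not affect the result: erasing the first occurrence of one character never
-- changes which occurrence of a different character is first, so the removals
-- commute; we iterate in first-insertion (alphabet) order.
-- result.replace(char, '', 1) removes the first occurrence of char (no-op when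
-- absent): List.erase is exact for a single-character pattern with count 1.
def solveRound (result : List Char) : List Char :=
  let letters : PySem.Set Char := PySem.Set.ofList pvAlpha
  let toRemove : PySem.Set Char :=
    letters.foldl
      (fun tr letter => if letter ∈ result then PySem.Set.add tr letter else tr)
      PySem.Set.empty
  toRemove.foldl (fun r c => r.erase c) result

-- The while loop; fuel only makes it total: on an all-lowercase string every pass
-- on a nonempty result strictly shortens it, so s.length + 1 iterations suffice.
def solveGo : Nat → List Char → List Char → List Char
  | 0, _, prev => prev
  | fuel + 1, result, prev =>
    if result = [] then prev
    else solveGo fuel (solveRound result) result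

def solve (s : String) : String :=
  String.ofList (solveGo (s.toList.length + 1) s.toList [])

-- ===== PORT B =====
-- s.count(c) for a single character c is List.count on the code points.
def solve_alt (s : String) : String :=
  let l := s.toList
  if l = [] then ""
  else
    -- max over set(s): a running max consumed from a Python set is order-independent
    let m := (PySem.Set.ofList l).foldl (fun m c => if m < l.count c then l.count c else m) 0
    let p := l.reverse.foldl
      (fun (st : PySem.Set Char × List Char) c =>
        if c ∈ st.1 then st
        else (PySem.Set.add st.1 c, if l.count c = m then st.2 ++ [c] else st.2))
      (PySem.Set.empty, [])
    String.ofList p.2.reverse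

-- ===== PRECONDITION & SPEC =====
-- Pre_: every character is a lowercase ASCII letter.  On any nonempty input with a
-- character that is not a lowercase letter, Python A loops forever (it is never
-- removed, so `result` never becomes empty); A returns exactly on Pre_'s strings.
def pvLowerChar (c : Char) : Bool := 97 ≤ c.toNat && c.toNat ≤ 122
def Pre_solve (s : String) : Prop := (s.toList.all pvLowerChar) = true
instance (s : String) : Decidable (Pre_solve s) := by unfold Pre_solve; infer_instance

def pvWitness_solve : String := "aabcbb"

def Spec_solve (s : String) (out : String) : Prop := out = solve_alt s
instance (s : String) (out : String) : Decidable (Spec_solve s out) := by unfold Spec_solve; infer_instance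

-- ===== CLAIM (what is proved, stated in full; the proofs are below) =====
def Claim_equal_solve : Prop := ∀ (s : String), Dom_solve s → Pre_solve s → Spec_solve s (solve s)

-- ===== LEMMAS AND PROOFS =====

-- drop the first occurrence of each character of S from l (S consumed as we go)
def dfS (S : List Char) : List Char → List Char
  | [] => []
  | c :: t => if c ∈ S then dfS (S.erase c) t else c :: dfS S t

-- distinct characters of l, each at its LAST occurrence, in order; `seen` are
-- characters already emitted further right
def los (seen : List Char) : List Char → List Char
  | [] => []
  | a :: t => if a ∈ seen ∨ a ∈ t then los seen t else a :: los seen t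

-- collect first-time characters, given an initial seen-set
def cA (seen : PySem.Set Char) : List Char → List Char
  | [] => []
  | c :: t => if c ∈ seen then cA seen t else c :: cA (PySem.Set.add seen c) t

-- maximum of the per-character counts of l
def maxCnt (l : List Char) : Nat := l.foldl (fun m c => max m (l.count c)) 0

-- B's selection, as a closed form
def Bf (l : List Char) : List Char :=
  (los [] l).filter (fun c => decide (l.count c = maxCnt l))

lemma dfS_nil : ∀ l : List Char, dfS [] l = l := by
  intro l; induction l with
  | nil => rfl
  | cons a t ih => simpa [dfS] using ih

lemma count_dfS (l : List Char) : ∀ (S : List Char), S.Nodup → ∀ c,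
    (dfS S l).count c = if c ∈ S then l.count c - 1 else l.count c := by
  induction l with
  | nil => intro S hS c; simp [dfS]
  | cons a t ih =>
    intro S hS c
    rw [dfS]
    by_cases ha : a ∈ S
    · rw [if_pos ha, ih (S.erase a) (hS.erase a) c]
      by_cases hca : c = a
      · subst hca
        have h1 : c ∉ S.erase c := by
          simp [List.Nodup.mem_erase_iff hS]
        simp [h1, ha, List.count_cons_self]
      · have h2 : (c ∈ S.erase a) ↔ (c ∈ S) := by
          simp [List.Nodup.mem_erase_iff hS, hca]
        rw [List.count_cons_of_ne (Ne.symm hca)]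
        split_ifs with h3 h4 h4
        · rfl
        · exact absurd (h2.1 h3) h4
        · exact absurd (h2.2 h4) h3
        · rfl
    · rw [if_neg ha]
      by_cases hca : c = a
      · subst hca
        simp [ha, List.count_cons_self, ih S hS c]
      · rw [List.count_cons_of_ne (Ne.symm hca), List.count_cons_of_ne (Ne.symm hca), ih S hS c]

lemma mem_dfS (l S : List Char) (hS : S.Nodup) (c : Char) :
    c ∈ dfS S l ↔ (if c ∈ S then 2 ≤ l.count c else c ∈ l) := by
  rw [show (c ∈ dfS S l) ↔ 0 < (dfS S l).count c from List.count_pos_iff.symm,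
      count_dfS l S hS c]
  split_ifs with hc
  · omega
  · exact List.count_pos_iff

lemma length_dfS (l : List Char) : ∀ S, (dfS S l).length ≤ l.length := by
  induction l with
  | nil => intro S; simp [dfS]
  | cons a t ih =>
    intro S
    rw [dfS]
    split_ifs
    · exact le_trans (ih _) (Nat.le_succ _)
    · simpa using ih S

lemma dfS_cons (a : Char) (l : List Char) : ∀ S : List Char, (a :: S).Nodup →
    dfS (a :: S) l = dfS S (l.erase a) := by
  induction l with
  | nil => intro S hS; simp [dfS]
  | cons c t ih =>
    intro S hS
    have haS : a ∉ S := (List.nodup_cons.1 hS).1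
    by_cases hca : c = a
    · subst hca
      rw [dfS, if_pos (List.mem_cons_self), List.erase_cons_head, List.erase_cons_head]
    · rw [List.erase_cons_tail (by simpa using hca)]
      by_cases hcS : c ∈ S
      · rw [dfS, if_pos (List.mem_cons_of_mem a hcS),
            List.erase_cons_tail (by simpa using (Ne.symm hca)), dfS, if_pos hcS]
        exact ih (S.erase c) (by
          rw [List.nodup_cons]
          exact ⟨fun h => haS ((List.Nodup.mem_erase_iff (List.nodup_cons.1 hS).2).1 h).2,
                 ((List.nodup_cons.1 hS).2).erase c⟩)
      · have : c ∉ a :: S := by simp [hca, hcS]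
        rw [dfS, if_neg this, dfS, if_neg hcS, ih S hS]

lemma foldl_erase_eq_dfS : ∀ (S : List Char), S.Nodup → ∀ l : List Char,
    S.foldl (fun r c => r.erase c) l = dfS S l := by
  intro S
  induction S with
  | nil => intro _ l; simp [dfS_nil]
  | cons a S ih =>
    intro hS l
    rw [List.foldl_cons, ih (List.nodup_cons.1 hS).2 (l.erase a), dfS_cons a l S hS]

lemma los_congr (l : List Char) : ∀ s₁ s₂ : List Char, (∀ x, x ∈ s₁ ↔ x ∈ s₂) →
    los s₁ l = los s₂ l := by
  induction l with
  | nil => intro _ _ _; rfl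
  | cons a t ih =>
    intro s₁ s₂ h
    have hiff : (a ∈ s₁ ∨ a ∈ t) ↔ (a ∈ s₂ ∨ a ∈ t) := or_congr_left (h a)
    rw [los, los, ih s₁ s₂ h]
    by_cases hm : a ∈ s₂ ∨ a ∈ t
    · rw [if_pos (hiff.2 hm), if_pos hm]
    · rw [if_neg (fun hx => hm (hiff.1 hx)), if_neg hm]

lemma mem_of_mem_los (l : List Char) : ∀ seen c, c ∈ los seen l → c ∈ l := by
  induction l with
  | nil => intro _ _ h; simp [los] at h
  | cons a t ih =>
    intro seen c h
    rw [los] at h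
    split_ifs at h with h1
    · exact List.mem_cons_of_mem a (ih seen c h)
    · rcases List.mem_cons.1 h with h2 | h2
      · exact h2 ▸ List.mem_cons_self
      · exact List.mem_cons_of_mem a (ih seen c h2)

lemma los_dfS (l : List Char) : ∀ S : List Char, S.Nodup →
    los [] (dfS S l) = (los [] l).filter (fun c => decide (c ∉ S ∨ 2 ≤ l.count c)) := by
  induction l with
  | nil => intro S _; simp [dfS, los]
  | cons a t ih =>
    intro S hS
    by_cases haS : a ∈ S
    · rw [dfS, if_pos haS, ih (S.erase a) (hS.erase a), los]
      by_cases hat : a ∈ t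
      · rw [if_pos (Or.inr hat)]
        apply List.filter_congr
        intro c hc
        have hct : c ∈ t := mem_of_mem_los t [] c hc
        by_cases hca : c = a
        · subst hca
          have h1 : c ∉ S.erase c := by simp [List.Nodup.mem_erase_iff hS]
          have h2 : 2 ≤ (c :: t).count c := by
            have := List.count_pos_iff.2 hct
            simp [List.count_cons_self]; omega
          simp [h1, hat]
        · have h2 : (c ∈ S.erase a) ↔ (c ∈ S) := by
            simp [List.Nodup.mem_erase_iff hS, hca]
          rw [List.count_cons_of_ne (Ne.symm hca)]
          simp [h2]
      · rw [if_neg (by simp [hat])]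
        have hpa : ¬ (a ∉ S ∨ 2 ≤ (a :: t).count a) := by
          have : t.count a = 0 := List.count_eq_zero_of_not_mem hat
          simp [haS, List.count_cons_self, this]
        rw [List.filter_cons_of_neg (by simpa using hpa)]
        apply List.filter_congr
        intro c hc
        have hct : c ∈ t := mem_of_mem_los t [] c hc
        have hca : c ≠ a := fun h => hat (h ▸ hct)
        have h2 : (c ∈ S.erase a) ↔ (c ∈ S) := by
          simp [List.Nodup.mem_erase_iff hS, hca]
        rw [List.count_cons_of_ne (Ne.symm hca)]
        simp [h2]
    · rw [dfS, if_neg haS, los]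
      have hmem : a ∈ dfS S t ↔ a ∈ t := by
        rw [mem_dfS t S hS a, if_neg haS]
      by_cases hat : a ∈ t
      · rw [if_pos (Or.inr (hmem.2 hat)), ih S hS, los, if_pos (Or.inr hat)]
        apply List.filter_congr
        intro c hc
        by_cases hca : c = a
        · subst hca; simp [haS]
        · rw [List.count_cons_of_ne (Ne.symm hca)]
      · rw [if_neg (by simp [hmem, hat]), ih S hS, los, if_neg (by simp [hat]),
            List.filter_cons_of_pos (by simp [haS])]
        congr 1
        apply List.filter_congr
        intro c hc
        have hct : c ∈ t := mem_of_mem_los t [] c hc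
        have hca : c ≠ a := fun h => hat (h ▸ hct)
        rw [List.count_cons_of_ne (Ne.symm hca)]

lemma los_append_singleton (c : Char) (xs : List Char) : ∀ seen,
    los seen (xs ++ [c]) = los (c :: seen) xs ++ (if c ∈ seen then [] else [c]) := by
  induction xs with
  | nil =>
    intro seen
    simp only [List.nil_append, los]
    by_cases h : c ∈ seen <;> simp [h]
  | cons a xs ih =>
    intro seen
    rw [List.cons_append, los, ih seen, los]
    have hiff : (a ∈ seen ∨ a ∈ xs ++ [c]) ↔ (a ∈ c :: seen ∨ a ∈ xs) := by
      simp [List.mem_append, List.mem_cons]; tauto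
    by_cases hm : a ∈ c :: seen ∨ a ∈ xs
    · rw [if_pos (hiff.2 hm), if_pos hm]
    · rw [if_neg (fun hx => hm (hiff.1 hx)), if_neg hm, List.cons_append]

lemma cA_reverse (r : List Char) : ∀ seen : PySem.Set Char,
    (cA seen r).reverse = los seen r.reverse := by
  induction r with
  | nil => intro seen; rfl
  | cons c t ih =>
    intro seen
    rw [List.reverse_cons, los_append_singleton c t.reverse seen, cA]
    by_cases h : c ∈ seen
    · rw [if_pos h, if_pos h, List.append_nil, ih seen]
      refine los_congr t.reverse seen (c :: seen) (fun x => ?_)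
      rw [List.mem_cons]
      exact ⟨fun hx => Or.inr hx, fun hx => hx.elim (fun he => he ▸ h) id⟩
    · rw [if_neg h, if_neg h, List.reverse_cons, ih (PySem.Set.add seen c)]
      congr 1
      exact los_congr t.reverse (PySem.Set.add seen c) (c :: seen)
        (by intro x; rw [PySem.Set.mem_add]; simp [List.mem_cons]; tauto)

lemma los_of_nodup (l : List Char) (h : l.Nodup) : los [] l = l := by
  induction l with
  | nil => rfl
  | cons a t ih =>
    rw [los, if_neg (by simp [(List.nodup_cons.1 h).1]), ih (List.nodup_cons.1 h).2]

lemma foldl_if_max (g : Char → Nat) : ∀ (l : List Char) (init : Nat),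
    l.foldl (fun m c => if m < g c then g c else m) init
      = l.foldl (fun m c => max m (g c)) init := by
  intro l
  induction l with
  | nil => intro init; rfl
  | cons a t ih =>
    intro init
    rw [List.foldl_cons, List.foldl_cons, ih]
    congr 1
    split_ifs with h
    · exact (Nat.max_eq_right h.le).symm
    · exact (Nat.max_eq_left (Nat.le_of_not_lt h)).symm

lemma count_le_maxCnt (l : List Char) (c : Char) (hc : c ∈ l) : l.count c ≤ maxCnt l :=
  (PySem.List.le_foldl_max_nat l (fun c => l.count c) 0).2 c hc

lemma foldl_max_le (g : Char → Nat) (B : Nat) : ∀ (l : List Char) (init : Nat),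
    init ≤ B → (∀ c ∈ l, g c ≤ B) → l.foldl (fun m c => max m (g c)) init ≤ B := by
  intro l
  induction l with
  | nil => intro init h _; simpa using h
  | cons a t ih =>
    intro init h hall
    rw [List.foldl_cons]
    exact ih _ (by have := hall a List.mem_cons_self; omega)
      (fun c hc => hall c (List.mem_cons_of_mem a hc))

lemma maxCnt_ofList_eq (l : List Char) :
    (PySem.Set.ofList l).foldl (fun m c => if m < l.count c then l.count c else m) 0
      = maxCnt l := by
  rw [foldl_if_max (fun c => l.count c) (PySem.Set.ofList l) 0]
  apply Nat.le_antisymm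
  · apply foldl_max_le
    · exact Nat.zero_le _
    · intro c hc
      exact (PySem.List.le_foldl_max_nat l (fun c => l.count c) 0).2 c
        ((PySem.Set.mem_ofList _ _).1 hc)
  · apply foldl_max_le
    · exact Nat.zero_le _
    · intro c hc
      exact (PySem.List.le_foldl_max_nat (PySem.Set.ofList l) (fun c => l.count c) 0).2 c
        ((PySem.Set.mem_ofList _ _).2 hc)

lemma foldl_max_attained (g : Char → Nat) : ∀ (l : List Char) (init : Nat),
    l.foldl (fun m c => max m (g c)) init = init ∨
      ∃ c ∈ l, g c = l.foldl (fun m c => max m (g c)) init := by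
  intro l
  induction l with
  | nil => intro init; exact Or.inl rfl
  | cons a t ih =>
    intro init
    rw [List.foldl_cons]
    rcases ih (max init (g a)) with h | ⟨c, hc, hgc⟩
    · rcases Nat.le_total (g a) init with h2 | h2
      · exact Or.inl (by rw [h, Nat.max_eq_left h2])
      · exact Or.inr ⟨a, List.mem_cons_self, by rw [h, Nat.max_eq_right h2]⟩
    · exact Or.inr ⟨c, List.mem_cons_of_mem a hc, hgc⟩

lemma maxCnt_attained (l : List Char) (h : l ≠ []) : ∃ c ∈ l, l.count c = maxCnt l := by
  rcases foldl_max_attained (fun c => l.count c) l 0 with h0 | h0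
  · obtain ⟨a, t, rfl⟩ := List.exists_cons_of_ne_nil h
    have h1 : 0 < (a :: t).count a := List.count_pos_iff.2 List.mem_cons_self
    have h2 := count_le_maxCnt (a :: t) a List.mem_cons_self
    unfold maxCnt at *
    omega
  · exact h0

lemma one_le_maxCnt (l : List Char) (h : l ≠ []) : 1 ≤ maxCnt l := by
  obtain ⟨a, t, rfl⟩ := List.exists_cons_of_ne_nil h
  have h1 : 0 < (a :: t).count a := List.count_pos_iff.2 List.mem_cons_self
  have h2 := count_le_maxCnt (a :: t) a List.mem_cons_self
  omega

lemma toRemove_eq_filter (result : List Char) : ∀ (S0 : List Char) (tr : PySem.Set Char),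
    S0.Nodup → (∀ x ∈ S0, x ∉ tr) →
    S0.foldl (fun tr letter => if letter ∈ result then PySem.Set.add tr letter else tr) tr
      = tr ++ S0.filter (fun c => decide (c ∈ result)) := by
  intro S0
  induction S0 with
  | nil => intro tr _ _; simp
  | cons x S0 ih =>
    intro tr hnd hnm
    rw [List.foldl_cons]
    by_cases hx : x ∈ result
    · rw [if_pos hx, PySem.Set.add_of_not_mem (hnm x List.mem_cons_self),
          ih (tr ++ [x]) (List.nodup_cons.1 hnd).2
            (by
              intro y hy
              have hyx : y ≠ x := fun h => (List.nodup_cons.1 hnd).1 (h ▸ hy)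
              simp [List.mem_append, hyx]
              exact hnm y (List.mem_cons_of_mem x hy)),
          List.filter_cons_of_pos (by simpa using hx), List.append_assoc]
      rfl
    · rw [if_neg hx, ih tr (List.nodup_cons.1 hnd).2
            (fun y hy => hnm y (List.mem_cons_of_mem x hy)),
          List.filter_cons_of_neg (by simpa using hx)]

lemma pvAlpha_nodup : pvAlpha.Nodup := by decide

lemma mem_pvAlpha_of_bounds (c : Char) (h1 : 97 ≤ c.toNat) (h2 : c.toNat ≤ 122) : c ∈ pvAlpha := by
  have hc : c = Char.ofNat c.toNat := (Char.ofNat_toNat c).symm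
  rw [hc]
  interval_cases h : c.toNat <;> decide

lemma pre_forall (s : String) (h : Pre_solve s) : ∀ c ∈ s.toList, c ∈ pvAlpha := by
  intro c hc
  have hb := List.all_eq_true.1 h c hc
  simp only [pvLowerChar, Bool.and_eq_true, decide_eq_true_eq] at hb
  exact mem_pvAlpha_of_bounds c hb.1 hb.2

lemma solveRound_eq_dfS (result : List Char) :
    solveRound result = dfS (pvAlpha.filter (fun c => decide (c ∈ result))) result := by
  show List.foldl (fun r c => r.erase c) result
      (List.foldl (fun tr letter => if letter ∈ result then PySem.Set.add tr letter else tr)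
        PySem.Set.empty (PySem.Set.ofList pvAlpha))
    = dfS (pvAlpha.filter (fun c => decide (c ∈ result))) result
  have hof : (PySem.Set.ofList pvAlpha : List Char) = pvAlpha := by decide
  rw [hof,
      toRemove_eq_filter result pvAlpha PySem.Set.empty pvAlpha_nodup (by intro x _ h; simp [PySem.Set.empty] at h)]
  rw [show (PySem.Set.empty ++ pvAlpha.filter (fun c => decide (c ∈ result)) : List Char)
        = pvAlpha.filter (fun c => decide (c ∈ result)) from List.nil_append _]
  exact foldl_erase_eq_dfS _ (pvAlpha_nodup.filter _) result

lemma mem_filterAlpha (result : List Char) (hl : ∀ c ∈ result, c ∈ pvAlpha) (c : Char) :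
    c ∈ pvAlpha.filter (fun c => decide (c ∈ result)) ↔ c ∈ result := by
  simp only [List.mem_filter, decide_eq_true_eq]
  exact ⟨fun h => h.2, fun h => ⟨hl c h, h⟩⟩

lemma count_round (result : List Char) (hl : ∀ c ∈ result, c ∈ pvAlpha) (c : Char) :
    (solveRound result).count c = result.count c - 1 := by
  rw [solveRound_eq_dfS, count_dfS result _ (pvAlpha_nodup.filter _) c]
  by_cases hc : c ∈ result
  · rw [if_pos ((mem_filterAlpha result hl c).2 hc)]
  · rw [if_neg (fun h => hc ((mem_filterAlpha result hl c).1 h)),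
        List.count_eq_zero_of_not_mem hc]

lemma mem_round (result : List Char) (hl : ∀ c ∈ result, c ∈ pvAlpha) (c : Char) :
    c ∈ solveRound result ↔ 2 ≤ result.count c := by
  rw [show (c ∈ solveRound result) ↔ 0 < (solveRound result).count c from
        List.count_pos_iff.symm, count_round result hl c]
  omega

lemma length_round_lt (result : List Char) (hl : ∀ c ∈ result, c ∈ pvAlpha)
    (h : result ≠ []) : (solveRound result).length < result.length := by
  obtain ⟨a, t, rfl⟩ := List.exists_cons_of_ne_nil h
  rw [solveRound_eq_dfS, dfS,
      if_pos ((mem_filterAlpha (a :: t) hl a).2 List.mem_cons_self)]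
  exact Nat.lt_succ_of_le (le_trans (length_dfS t _) le_rfl)

lemma los_round (result : List Char) (hl : ∀ c ∈ result, c ∈ pvAlpha) :
    los [] (solveRound result)
      = (los [] result).filter (fun c => decide (2 ≤ result.count c)) := by
  rw [solveRound_eq_dfS, los_dfS result _ (pvAlpha_nodup.filter _)]
  apply List.filter_congr
  intro c hc
  have hcm : c ∈ result := mem_of_mem_los result [] c hc
  simp [(mem_filterAlpha result hl c).2 hcm]

lemma maxCnt_round (result : List Char) (hl : ∀ c ∈ result, c ∈ pvAlpha)
    (hM : 2 ≤ maxCnt result) : maxCnt (solveRound result) = maxCnt result - 1 := by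
  have hne : result ≠ [] := by
    intro h; rw [h] at hM; simp [maxCnt] at hM
  have hub : maxCnt (solveRound result) ≤ maxCnt result - 1 := by
    apply foldl_max_le
    · omega
    · intro c hc
      have hcr : 2 ≤ result.count c := (mem_round result hl c).1 hc
      have hcm : c ∈ result := List.count_pos_iff.1 (by omega)
      have := count_le_maxCnt result c hcm
      rw [count_round result hl c]
      omega
  obtain ⟨c, hc, hcnt⟩ := maxCnt_attained result hne
  have hcr : c ∈ solveRound result := (mem_round result hl c).2 (by omega)
  have hlb := count_le_maxCnt (solveRound result) c hcr
  rw [count_round result hl c, hcnt] at hlb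
  omega

lemma round_nil_of_maxCnt_one (result : List Char) (hl : ∀ c ∈ result, c ∈ pvAlpha)
    (hM : maxCnt result ≤ 1) : solveRound result = [] := by
  by_contra h
  obtain ⟨a, t, heq⟩ := List.exists_cons_of_ne_nil h
  have ha : a ∈ solveRound result := heq ▸ List.mem_cons_self
  have h2 : 2 ≤ result.count a := (mem_round result hl a).1 ha
  have h3 : a ∈ result := List.count_pos_iff.1 (by omega)
  have := count_le_maxCnt result a h3
  omega

lemma round_ne_nil (result : List Char) (hl : ∀ c ∈ result, c ∈ pvAlpha)
    (hM : 2 ≤ maxCnt result) : solveRound result ≠ [] := by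
  have hne : result ≠ [] := by
    intro h; rw [h] at hM; simp [maxCnt] at hM
  obtain ⟨c, hc, hcnt⟩ := maxCnt_attained result hne
  exact List.ne_nil_of_mem ((mem_round result hl c).2 (by omega))

lemma Bf_of_maxCnt_one (l : List Char) (hM : maxCnt l = 1) : Bf l = l := by
  have hall : ∀ c ∈ l, l.count c = 1 := by
    intro c hc
    have h1 : 0 < l.count c := List.count_pos_iff.2 hc
    have h2 := count_le_maxCnt l c hc
    omega
  have hnd : l.Nodup := List.nodup_iff_count_le_one.2 (by
    intro a
    by_cases ha : a ∈ l
    · exact (hall a ha).le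
    · simp [List.count_eq_zero_of_not_mem ha])
  unfold Bf
  rw [los_of_nodup l hnd, hM]
  exact List.filter_eq_self.2 (fun c hc => by simp [hall c hc])

lemma Bf_round (l : List Char) (hl : ∀ c ∈ l, c ∈ pvAlpha) (hM : 2 ≤ maxCnt l) :
    Bf (solveRound l) = Bf l := by
  unfold Bf
  rw [los_round l hl, maxCnt_round l hl hM, List.filter_filter]
  apply List.filter_congr
  intro c hc
  have hcl : c ∈ l := mem_of_mem_los l [] c hc
  have h1 : (solveRound l).count c = l.count c - 1 := count_round l hl c
  have h2 : l.count c ≤ maxCnt l := count_le_maxCnt l c hcl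
  rw [h1, ← Bool.decide_and, decide_eq_decide]
  omega

lemma solveGo_eq_Bf : ∀ (n : Nat) (l prev : List Char) (fuel : Nat),
    l.length ≤ n → l ≠ [] → (∀ c ∈ l, c ∈ pvAlpha) → l.length ≤ fuel →
    solveGo fuel l prev = Bf l := by
  intro n
  induction n with
  | zero =>
    intro l prev fuel h0 hne _ _
    exact absurd (List.length_eq_zero_iff.1 (Nat.le_zero.1 h0)) hne
  | succ n ih =>
    intro l prev fuel hlen hne hab hfuel
    cases fuel with
    | zero =>
      have : l = [] := List.length_eq_zero_iff.1 (Nat.le_zero.1 hfuel)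
      exact absurd this hne
    | succ f =>
      rw [solveGo, if_neg hne]
      by_cases hM : maxCnt l ≤ 1
      · have hr : solveRound l = [] := round_nil_of_maxCnt_one l hab hM
        have hM1 : maxCnt l = 1 := le_antisymm hM (one_le_maxCnt l hne)
        rw [hr, show solveGo f [] l = l from by cases f <;> simp [solveGo],
            Bf_of_maxCnt_one l hM1]
      · replace hM : 2 ≤ maxCnt l := by omega
        have hrne := round_ne_nil l hab hM
        have hlt := length_round_lt l hab hne
        have hmem : ∀ c ∈ solveRound l, c ∈ pvAlpha := by
          intro c hc
          have : 2 ≤ l.count c := (mem_round l hab c).1 hc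
          exact hab c (List.count_pos_iff.1 (by omega))
        rw [ih (solveRound l) l f (by omega) hrne hmem (by omega)]
        exact Bf_round l hab hM

lemma alt_fold_snd (l : List Char) (m : Nat) :
    ∀ (r : List Char) (seen : PySem.Set Char) (out : List Char),
    (r.foldl
      (fun (st : PySem.Set Char × List Char) c =>
        if c ∈ st.1 then st
        else (PySem.Set.add st.1 c, if l.count c = m then st.2 ++ [c] else st.2))
      (seen, out)).2
    = out ++ (cA seen r).filter (fun c => decide (l.count c = m)) := by
  intro r
  induction r with
  | nil => intro seen out; simp [cA]
  | cons c t ih =>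
    intro seen out
    rw [List.foldl_cons, cA]
    by_cases hc : c ∈ seen
    · rw [if_pos hc, if_pos hc, ih seen out]
    · rw [if_neg hc, if_neg hc]
      by_cases hcm : l.count c = m
      · rw [if_pos hcm, ih (PySem.Set.add seen c) (out ++ [c]),
            List.filter_cons_of_pos (by simpa using hcm), List.append_assoc]
        rfl
      · rw [if_neg hcm, ih (PySem.Set.add seen c) out,
            List.filter_cons_of_neg (by simpa using hcm)]

lemma solve_alt_eq_Bf (s : String) (h : s.toList ≠ []) :
    solve_alt s = String.ofList (Bf s.toList) := by
  unfold solve_alt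
  simp only [if_neg h]
  rw [maxCnt_ofList_eq s.toList]
  rw [alt_fold_snd s.toList _ s.toList.reverse PySem.Set.empty []]
  rw [List.nil_append, ← List.filter_reverse, cA_reverse s.toList.reverse PySem.Set.empty,
      List.reverse_reverse]
  rfl

-- ===== VERDICT (by name: the statement is the Claim_ definition above) =====
theorem solve_spec : Claim_equal_solve := by
  intro s _ hpre0
  have hpre := pre_forall s hpre0
  unfold Spec_solve
  by_cases h : s.toList = []
  · unfold solve solve_alt
    rw [h]
    simp [solveGo]
  · unfold solve
    rw [solve_alt_eq_Bf s h]
    congr 1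
    exact solveGo_eq_Bf s.toList.length s.toList [] (s.toList.length + 1)
      le_rfl h hpre (Nat.le_succ _)
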